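-- pv_equiv track=rewrite | github.com/nitzanpalgi/Automated-shifts-assignment | output/output.py | remove_cell_sign
-- ===== SOURCE A (Python) =====
-- def remove_cell_sign(task_name):
--     if "_" not in task_name:
--         return task_name.split("&")[0]
--     split_tasks = task_name.split("_")
--     new_name = ""
--     for i in range(len(split_tasks)):
--         if i < len(split_tasks) - 1:
--             new_name += split_tasks[i].split("&")[0] + "_"
--         else:
--             new_name += split_tasks[i].split("&")[0]
--     return new_name
-- ===== SOURCE B (Python) =====
-- def remove_cell_sign(task_name):
--     # single left-to-right scan: copy characters, but once a '&' is seen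
--     # skip everything until the next '_' (which is kept)
--     out = []
--     skipping = False
--     for ch in task_name:
--         if ch == '_':
--             out.append(ch)
--             skipping = False
--         elif ch == '&':
--             skipping = True
--         elif not skipping:
--             out.append(ch)
--     return ''.join(out)
-- ===== Notes on version B (the rewrite author's own statement) =====
-- stated objective: simpler
-- what changed: Replaces split-on-'_' / per-segment split-on-'&' / index-loop reassembly with one linear character scan that copies characters and skips from each '&' to the next '_'.
import Mathlib
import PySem

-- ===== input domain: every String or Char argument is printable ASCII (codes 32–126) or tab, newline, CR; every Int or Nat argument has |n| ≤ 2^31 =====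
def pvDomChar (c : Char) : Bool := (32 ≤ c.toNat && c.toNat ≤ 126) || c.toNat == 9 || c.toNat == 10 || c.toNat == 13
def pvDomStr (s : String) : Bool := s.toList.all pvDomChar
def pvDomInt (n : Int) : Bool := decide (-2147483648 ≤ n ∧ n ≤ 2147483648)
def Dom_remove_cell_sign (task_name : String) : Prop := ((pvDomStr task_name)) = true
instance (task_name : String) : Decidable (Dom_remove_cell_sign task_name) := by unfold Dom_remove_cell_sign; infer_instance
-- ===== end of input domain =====

-- B replaces A's split/loop/join reassembly by a single character scan (simpler, same cost).


-- ===== PORT A =====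
-- A: if "_" not in task_name, return task_name.split("&")[0]; otherwise split on "_",
-- loop over indices, appending segment.split("&")[0] plus "_" for all but the last.
def remove_cell_sign (task_name : String) : String :=
  let cs := task_name.toList
  if PySem.Chars.isIn ['_'] cs = false then
    String.ofList (PySem.List.pyGetD (PySem.Chars.splitOn cs ['&']) 0 [])
  else
    let split_tasks := PySem.Chars.splitOn cs ['_']
    String.ofList ((PySem.List.pyRange 0 (split_tasks.length : Int) 1).foldl
      (fun acc i =>
        if i < (split_tasks.length : Int) - 1 then
          acc ++ PySem.List.pyGetD (PySem.Chars.splitOn (PySem.List.pyGetD split_tasks i []) ['&']) 0 [] ++ ['_']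
        else
          acc ++ PySem.List.pyGetD (PySem.Chars.splitOn (PySem.List.pyGetD split_tasks i []) ['&']) 0 []) [])

-- ===== PORT B =====
-- B: one pass over the characters with an (out, skipping) accumulator, as in Source B.
def remove_cell_sign_alt (task_name : String) : String :=
  let st := task_name.toList.foldl
    (fun (st : List Char × Bool) ch =>
      if ch = '_' then (st.1 ++ [ch], false)
      else if ch = '&' then (st.1, true)
      else if !st.2 then (st.1 ++ [ch], st.2)
      else st) ([], false)
  String.ofList st.1

-- ===== PRECONDITION & SPEC =====
def Spec_remove_cell_sign (task_name : String) (out : String) : Prop := out = remove_cell_sign_alt task_name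
instance (task_name : String) (out : String) : Decidable (Spec_remove_cell_sign task_name out) := by unfold Spec_remove_cell_sign; infer_instance

-- ===== CLAIM (what is proved, stated in full; the proofs are below) =====
def Claim_equal_remove_cell_sign : Prop := ∀ (task_name : String), Dom_remove_cell_sign task_name → Spec_remove_cell_sign task_name (remove_cell_sign task_name)

-- ===== LEMMAS AND PROOFS =====

-- recursive form of B's scan (proof vehicle)
def rcsScan : List Char → Bool → List Char
  | [], _ => []
  | c :: rest, sk =>
    if c = '_' then c :: rcsScan rest false
    else if c = '&' then rcsScan rest true
    else if sk then rcsScan rest sk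
    else c :: rcsScan rest sk

-- map over the head of a list only
def mapHead (f : List Char → List Char) : List (List Char) → List (List Char)
  | [] => []
  | p :: ps => f p :: ps

-- the "keep the part before the first '&'" function
def ampHead (p : List Char) : List Char := p.takeWhile (fun c => !decide (c = '&'))

lemma sp1_cc (s x y : List Char) (zs : List (List Char)) :
    List.intercalate s (x :: y :: zs) = x ++ s ++ List.intercalate s (y :: zs) := by
  simp [List.intercalate, List.intersperse]

lemma sp1_single (s x : List Char) : List.intercalate s [x] = x := by
  simp [List.intercalate]

-- structural single-char split (spec of PySem.Chars.splitOn with a one-char separator)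
def sp1 (d : Char) : List Char → List (List Char)
  | [] => [[]]
  | c :: rest => if c = d then [] :: sp1 d rest else mapHead (fun p => c :: p) (sp1 d rest)

lemma sp1_ne_nil (d : Char) (cs : List Char) : sp1 d cs ≠ [] := by
  induction cs with
  | nil => simp [sp1]
  | cons c rest ih =>
    simp only [sp1]
    split_ifs
    · simp
    · cases h : sp1 d rest with
      | nil => exact absurd h ih
      | cons p ps => simp [mapHead]

lemma mapHead_mapHead (f g : List Char → List Char) (l : List (List Char)) :
    mapHead f (mapHead g l) = mapHead (fun p => f (g p)) l := by
  cases l <;> simp [mapHead]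

lemma mapHead_id (l : List (List Char)) : mapHead (fun p => p) l = l := by
  cases l <;> simp [mapHead]

lemma mapHead_congr (f g : List Char → List Char) (l : List (List Char))
    (h : ∀ p, f p = g p) : mapHead f l = mapHead g l := by
  cases l <;> simp [mapHead, h]

lemma splitOn_go_eq (d : Char) (l cur : List Char) (acc : List (List Char)) (fuel : Nat)
    (h : l.length ≤ fuel) :
    PySem.Chars.splitOn.go [d] fuel l cur acc
      = acc.reverse ++ mapHead (fun p => cur.reverse ++ p) (sp1 d l) := by
  induction l generalizing fuel cur acc with
  | nil =>
    cases fuel with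
    | zero => simp [PySem.Chars.splitOn.go, sp1, mapHead]
    | succ f => simp [PySem.Chars.splitOn.go, sp1, mapHead]
  | cons c rest ih =>
    cases fuel with
    | zero => exact absurd h (by simp)
    | succ f =>
      have hlen : rest.length ≤ f := by simpa using h
      simp only [PySem.Chars.splitOn.go]
      by_cases hc : d = c
      · have hpre : [d].isPrefixOf (c :: rest) = true := by simp [List.isPrefixOf, hc]
        rw [if_pos hpre]
        have hrec := ih (cur := []) (acc := cur.reverse :: acc) (fuel := f) hlen
        simp only [List.length_cons, List.length_nil, Nat.zero_add, List.drop_succ_cons, List.drop_zero]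
        rw [hrec]
        have hsp : sp1 d (c :: rest) = [] :: sp1 d rest := by simp [sp1, hc.symm]
        rw [hsp]
        cases hs : sp1 d rest <;> simp [mapHead]
      · have hpre : [d].isPrefixOf (c :: rest) = false := by
          simp [List.isPrefixOf]; exact hc
        rw [if_neg (by simp [hpre])]
        rw [ih (cur := c :: cur) (acc := acc) (fuel := f) hlen]
        have hsp : sp1 d (c :: rest) = mapHead (fun p => c :: p) (sp1 d rest) := by
          simp [sp1]; intro h'; exact absurd h'.symm hc
        rw [hsp, mapHead_mapHead]
        congr 1
        apply mapHead_congr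
        intro p
        simp

lemma splitOn_eq_sp1 (d : Char) (cs : List Char) :
    PySem.Chars.splitOn cs [d] = sp1 d cs := by
  show PySem.Chars.splitOn.go [d] (cs.length + 1) cs [] [] = _
  rw [splitOn_go_eq d cs [] [] (cs.length + 1) (by omega)]
  simp [mapHead_id]

-- head of a '&'-split is the part before the first '&'
lemma head_sp1_amp (cs : List Char) :
    PySem.List.pyGetD (sp1 '&' cs) 0 [] = ampHead cs := by
  induction cs with
  | nil => simp [sp1, ampHead, PySem.List.pyGetD_zero]
  | cons c rest ih =>
    simp only [sp1]
    by_cases hc : c = '&'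
    · simp [hc, ampHead]
    · rw [if_neg hc]
      cases hsp : sp1 '&' rest with
      | nil => exact absurd hsp (sp1_ne_nil '&' rest)
      | cons p ps =>
        rw [hsp] at ih
        simp only [mapHead, PySem.List.pyGetD_zero, List.getD, List.getElem?_cons_zero,
          Option.getD_some] at ih ⊢
        simp [ampHead, hc] at ih ⊢
        exact ih

-- intercalate distributes a cons on the head segment
lemma intercalate_cons_head (s : List Char) (c : Char) (x : List Char) (l : List (List Char)) :
    List.intercalate s ((c :: x) :: l) = c :: List.intercalate s (x :: l) := by
  cases l with
  | nil => rw [sp1_single, sp1_single]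
  | cons q qs => rw [sp1_cc, sp1_cc]; simp

-- the two simultaneous scan characterizations
lemma scan_eq_intercalate (cs : List Char) :
    rcsScan cs false = List.intercalate ['_'] ((sp1 '_' cs).map ampHead)
    ∧ rcsScan cs true = List.intercalate ['_'] ([] :: ((sp1 '_' cs).tail.map ampHead)) := by
  induction cs with
  | nil => simp [rcsScan, sp1, ampHead, List.intercalate]
  | cons c rest ih =>
    obtain ⟨ih1, ih2⟩ := ih
    obtain ⟨p, ps, hsp⟩ : ∃ p ps, sp1 '_' rest = p :: ps := by
      cases h : sp1 '_' rest with
      | nil => exact absurd h (sp1_ne_nil '_' rest)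
      | cons p ps => exact ⟨p, ps, rfl⟩
    rw [hsp] at ih1 ih2
    simp only [List.tail_cons] at ih2
    by_cases h1 : c = '_'
    · subst h1
      have hscanf : rcsScan ('_' :: rest) false = '_' :: rcsScan rest false := by simp [rcsScan]
      have hscant : rcsScan ('_' :: rest) true = '_' :: rcsScan rest false := by simp [rcsScan]
      have hs : sp1 '_' ('_' :: rest) = [] :: sp1 '_' rest := by simp [sp1]
      constructor
      · rw [hscanf, hs, hsp, List.map_cons, List.map_cons, sp1_cc, ih1, List.map_cons]
        simp [ampHead]
      · rw [hscant, hs, List.tail_cons, hsp, List.map_cons, sp1_cc, ih1, List.map_cons]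
        simp [ampHead]
    · have hs : sp1 '_' (c :: rest) = (c :: p) :: ps := by
        simp only [sp1, if_neg h1, hsp, mapHead]
      by_cases h2 : c = '&'
      · subst h2
        have hscanf : rcsScan ('&' :: rest) false = rcsScan rest true := by simp [rcsScan]
        have hscant : rcsScan ('&' :: rest) true = rcsScan rest true := by simp [rcsScan]
        have hh : ampHead ('&' :: p) = [] := by simp [ampHead]
        constructor
        · rw [hscanf, hs, List.map_cons, hh, ih2]
        · rw [hscant, hs, List.tail_cons, ih2]
      · have hscanf : rcsScan (c :: rest) false = c :: rcsScan rest false := by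
          simp [rcsScan, h1, h2]
        have hscant : rcsScan (c :: rest) true = rcsScan rest true := by
          simp [rcsScan, h1, h2]
        have hh : ampHead (c :: p) = c :: ampHead p := by
          simp [ampHead, h2]
        constructor
        · rw [hscanf, hs, List.map_cons, hh, intercalate_cons_head, ← List.map_cons, ih1,
            List.map_cons]
        · rw [hscant, hs, List.tail_cons, ih2]

-- B's foldl equals the recursive scan
lemma foldl_eq_scan (cs : List Char) (acc : List Char) (sk : Bool) :
    (cs.foldl (fun (st : List Char × Bool) ch =>
      if ch = '_' then (st.1 ++ [ch], false)
      else if ch = '&' then (st.1, true)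
      else if !st.2 then (st.1 ++ [ch], st.2)
      else st) (acc, sk)).1 = acc ++ rcsScan cs sk := by
  induction cs generalizing acc sk with
  | nil => simp [rcsScan]
  | cons c rest ih =>
    simp only [Bool.not_eq_true'] at ih
    simp only [List.foldl_cons, rcsScan]
    by_cases h1 : c = '_'
    · simp [h1, ih]
    · by_cases h2 : c = '&'
      · simp [h2, ih]
      · cases sk <;> simp [h1, h2, ih]

-- A's index loop is intercalate of the mapped segments
lemma loopA (f : List Char → List Char) (ts : List (List Char)) :
    ∀ (m k : Nat) (acc : List Char), k + m = ts.length → 0 < m →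
    (PySem.List.pyRange (k : Int) (ts.length : Int) 1).foldl
      (fun acc i =>
        if i < (ts.length : Int) - 1 then
          acc ++ f (PySem.List.pyGetD ts i []) ++ ['_']
        else
          acc ++ f (PySem.List.pyGetD ts i [])) acc
      = acc ++ List.intercalate ['_'] ((ts.drop k).map f) := by
  intro m
  induction m with
  | zero => omega
  | succ m ih =>
    intro k acc hk _
    have hklen : k < ts.length := by omega
    rw [PySem.List.pyRange_one_cons (by exact_mod_cast hklen)]
    simp only [List.foldl_cons]
    have hget : PySem.List.pyGetD ts (k : Int) [] = ts[k] := by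
      rw [PySem.List.pyGetD_natCast]
      exact List.getD_eq_getElem ts [] hklen
    have hdrop : ts.drop k = ts[k] :: ts.drop (k + 1) := List.drop_eq_getElem_cons hklen
    by_cases hm : m = 0
    · subst hm
      have hklen' : k + 1 = ts.length := by omega
      have hlast : ¬ ((k : Int) < (ts.length : Int) - 1) := by
        rw [← hklen']; push_cast; omega
      rw [if_neg hlast]
      have hc : ((k : Int) + 1) = (ts.length : Int) := by exact_mod_cast hklen'
      rw [hc, PySem.List.pyRange_one_eq_nil (le_refl _)]
      simp only [List.foldl_nil, hget, hdrop]
      have hnil : ts.drop (k + 1) = [] := List.drop_eq_nil_of_le (by omega)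
      rw [hnil]
      simp only [List.map_cons, List.map_nil]
      rw [sp1_single]
    · have hlt : (k : Int) < (ts.length : Int) - 1 := by
        have : (k : Int) + 1 < (ts.length : Int) := by exact_mod_cast (by omega : k + 1 < ts.length)
        omega
      rw [if_pos hlt]
      have hcast : ((k : Int) + 1) = ((k + 1 : Nat) : Int) := by push_cast; ring
      rw [hcast, ih (k + 1) _ (by omega) (by omega)]
      rw [hget, hdrop]
      obtain ⟨q, qs, hq⟩ : ∃ q qs, ts.drop (k + 1) = q :: qs := by
        cases h : ts.drop (k + 1) with
        | nil =>
          have := List.drop_eq_nil_iff.mp h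
          omega
        | cons q qs => exact ⟨q, qs, rfl⟩
      rw [hq]
      simp only [List.map_cons]
      rw [sp1_cc]
      simp

-- no '_' in cs → sp1 is the singleton [cs]
lemma sp1_no_sep (cs : List Char) (h : '_' ∉ cs) : sp1 '_' cs = [cs] := by
  induction cs with
  | nil => rfl
  | cons c rest ih =>
    simp only [List.mem_cons, not_or] at h
    simp [sp1, Ne.symm h.1, ih h.2, mapHead]

-- ===== VERDICT (by name: the statement is the Claim_ definition above) =====
theorem remove_cell_sign_spec : Claim_equal_remove_cell_sign := by
  intro task_name _
  unfold Spec_remove_cell_sign remove_cell_sign remove_cell_sign_alt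
  dsimp only
  set cs := task_name.toList with hcs
  rw [foldl_eq_scan cs [] false]
  simp only [List.nil_append]
  by_cases hin : PySem.Chars.isIn ['_'] cs = false
  · rw [if_pos hin]
    have hno : '_' ∉ cs := by
      intro hmem
      have : PySem.Chars.isIn ['_'] cs = true :=
        (PySem.Chars.isIn_iff_infix ['_'] cs).mpr ((List.singleton_infix_iff '_' cs).mpr hmem)
      simp [this] at hin
    rw [(scan_eq_intercalate cs).1, sp1_no_sep cs hno, splitOn_eq_sp1, head_sp1_amp]
    simp only [List.map_cons, List.map_nil]
    rw [sp1_single]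
  · rw [if_neg hin]
    rw [(scan_eq_intercalate cs).1]
    rw [splitOn_eq_sp1]
    have hne := sp1_ne_nil '_' cs
    have hlen : 0 < (sp1 '_' cs).length := List.length_pos_of_ne_nil hne
    have := loopA (fun p => PySem.List.pyGetD (PySem.Chars.splitOn p ['&']) 0 [])
      (sp1 '_' cs) (sp1 '_' cs).length 0 [] (by omega) hlen
    simp only [Nat.cast_zero, List.drop_zero, List.nil_append] at this
    rw [this]
    have hmap : List.map (fun p => PySem.List.pyGetD (PySem.Chars.splitOn p ['&']) 0 []) (sp1 '_' cs)
        = List.map ampHead (sp1 '_' cs) :=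
      List.map_congr_left (fun p _ => by rw [splitOn_eq_sp1, head_sp1_amp])
    rw [hmap]
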